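-- pv_equiv track=rewrite | github.com/puneetrinity/reimagined-octo-bassoon | app/evaluation/response_evaluator.py | _addresses_query_intent
-- ===== SOURCE A (Python) =====
-- def _addresses_query_intent(query: str, response: str) -> bool:
--     """Check if response addresses the query intent"""
--     query_lower = query.lower()
--     response_lower = response.lower()
--
--     # Question type detection
--     question_types = {
--         "what": ["what is", "what are", "what does"],
--         "how": ["how to", "how do", "how can"],
--         "why": ["why is", "why do", "why does"],
--         "when": ["when is", "when do", "when does"],
--         "where": ["where is", "where do", "where can"],
--     }
--
--     # Check if response pattern matches query type
--     for q_type, patterns in question_types.items():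
--         if any(pattern in query_lower for pattern in patterns):
--             # Look for appropriate response patterns
--             if q_type == "what" and any(
--                 word in response_lower
--                 for word in ["is", "are", "refers to", "means"]
--             ):
--                 return True
--             elif q_type == "how" and any(
--                 word in response_lower
--                 for word in ["you can", "steps", "process", "method"]
--             ):
--                 return True
--             elif q_type == "why" and any(
--                 word in response_lower
--                 for word in ["because", "due to", "reason", "cause"]
--             ):
--                 return True
--             elif q_type == "when" and any(
--                 word in response_lower
--                 for word in ["time", "date", "period", "during"]
--             ):
--                 return True
--             elif q_type == "where" and any(
--                 word in response_lower for word in ["location", "place", "at", "in"]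
--             ):
--                 return True
--
--     return False
-- ===== SOURCE B (Python) =====
-- def _addresses_query_intent(query: str, response: str) -> bool:
--     """Check if response addresses the query intent"""
--     query_lower = query.lower()
--     response_lower = response.lower()
--
--     query_patterns = {
--         "what": ["what is", "what are", "what does"],
--         "how": ["how to", "how do", "how can"],
--         "why": ["why is", "why do", "why does"],
--         "when": ["when is", "when do", "when does"],
--         "where": ["where is", "where do", "where can"],
--     }
--     response_words = {
--         "what": ["is", "are", "refers to", "means"],
--         "how": ["you can", "steps", "process", "method"],
--         "why": ["because", "due to", "reason", "cause"],
--         "when": ["time", "date", "period", "during"],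
--         "where": ["location", "place", "at", "in"],
--     }
--
--     # Pass 1: which question types does the query exhibit?
--     asked = {t for t, ps in query_patterns.items() if any(p in query_lower for p in ps)}
--     # Pass 2: which question types does the response answer in style?
--     answered = {t for t, ws in response_words.items() if any(w in response_lower for w in ws)}
--     # Addressed iff some asked type is answered.
--     return bool(asked & answered)
-- ===== Notes on version B (the rewrite author's own statement) =====
-- stated objective: alternative
-- what changed: Replaces A's single early-returning loop with an if/elif chain by two independent staged passes: B first computes the set of question types detected in the query, separately the set of types whose answer-style words occur in the response, and returns whether the two sets intersect.
import Mathlib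
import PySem

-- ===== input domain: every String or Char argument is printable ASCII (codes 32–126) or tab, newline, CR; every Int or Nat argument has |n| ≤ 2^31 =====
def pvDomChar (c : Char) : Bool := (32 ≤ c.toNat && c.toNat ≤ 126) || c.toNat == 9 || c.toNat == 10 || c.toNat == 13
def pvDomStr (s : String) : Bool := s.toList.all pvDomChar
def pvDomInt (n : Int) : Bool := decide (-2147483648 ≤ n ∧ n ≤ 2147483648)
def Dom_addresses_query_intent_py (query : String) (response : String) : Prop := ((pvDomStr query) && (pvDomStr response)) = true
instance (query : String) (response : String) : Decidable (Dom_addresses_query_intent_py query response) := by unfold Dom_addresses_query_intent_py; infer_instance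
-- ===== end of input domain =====

-- B replaces A's early-returning loop + if/elif chain by two independent staged passes (asked types, answered types) intersected; objective: alternative decomposition, same cost. Return values proved equal on all inputs.

-- ===== PORT A =====
-- the dict of question types, in insertion order (iterated as an assoc list)
def pvQuestionTypes : List (String × List String) :=
  [("what", ["what is", "what are", "what does"]),
   ("how",  ["how to", "how do", "how can"]),
   ("why",  ["why is", "why do", "why does"]),
   ("when", ["when is", "when do", "when does"]),
   ("where", ["where is", "where do", "where can"])]

-- the for-loop over the dict items, with the if/elif chain inside
def pvALoop (ql rl : String) : List (String × List String) → Bool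
  | [] => false
  | (qType, patterns) :: rest =>
    if patterns.any (fun p => PySem.Str.isIn p ql) then
      if qType == "what" && (["is", "are", "refers to", "means"].any (fun w => PySem.Str.isIn w rl)) then
        true
      else if qType == "how" && (["you can", "steps", "process", "method"].any (fun w => PySem.Str.isIn w rl)) then
        true
      else if qType == "why" && (["because", "due to", "reason", "cause"].any (fun w => PySem.Str.isIn w rl)) then
        true
      else if qType == "when" && (["time", "date", "period", "during"].any (fun w => PySem.Str.isIn w rl)) then
        true
      else if qType == "where" && (["location", "place", "at", "in"].any (fun w => PySem.Str.isIn w rl)) then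
        true
      else pvALoop ql rl rest
    else pvALoop ql rl rest

def addresses_query_intent_py (query : String) (response : String) : Bool :=
  pvALoop (PySem.Str.lower query) (PySem.Str.lower response) pvQuestionTypes

-- ===== PORT B =====
def pvQueryPatterns : List (String × List String) :=
  [("what", ["what is", "what are", "what does"]),
   ("how",  ["how to", "how do", "how can"]),
   ("why",  ["why is", "why do", "why does"]),
   ("when", ["when is", "when do", "when does"]),
   ("where", ["where is", "where do", "where can"])]

def pvResponseWords : List (String × List String) :=
  [("what", ["is", "are", "refers to", "means"]),
   ("how",  ["you can", "steps", "process", "method"]),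
   ("why",  ["because", "due to", "reason", "cause"]),
   ("when", ["time", "date", "period", "during"]),
   ("where", ["location", "place", "at", "in"])]

-- the set comprehension {t for t, ws in tbl.items() if any(w in s for w in ws)}
-- (keys of the dict are distinct, so these lists hold distinct elements = a Python set)
def pvMatchedTypes (s : String) (tbl : List (String × List String)) : List String :=
  (tbl.filter (fun e => e.2.any (fun w => PySem.Str.isIn w s))).map Prod.fst

def addresses_query_intent_py_alt (query : String) (response : String) : Bool :=
  let asked := pvMatchedTypes (PySem.Str.lower query) pvQueryPatterns
  let answered := pvMatchedTypes (PySem.Str.lower response) pvResponseWords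
  -- bool(asked & answered): the intersection is non-empty
  !(asked.filter (fun t => answered.contains t)).isEmpty

-- ===== PRECONDITION & SPEC =====
def Spec_addresses_query_intent_py (query : String) (response : String) (out : Bool) : Prop := out = addresses_query_intent_py_alt query response
instance (query : String) (response : String) (out : Bool) : Decidable (Spec_addresses_query_intent_py query response out) := by unfold Spec_addresses_query_intent_py; infer_instance

-- ===== CLAIM (what is proved, stated in full; the proofs are below) =====
def Claim_equal_addresses_query_intent_py : Prop := ∀ (query : String) (response : String), Dom_addresses_query_intent_py query response → Spec_addresses_query_intent_py query response (addresses_query_intent_py query response)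

-- ===== LEMMAS AND PROOFS =====
theorem pvLoop_eq (ql rl : String) :
    pvALoop ql rl pvQuestionTypes =
      !((pvMatchedTypes ql pvQueryPatterns).filter
          (fun t => (pvMatchedTypes rl pvResponseWords).contains t)).isEmpty := by
  simp only [pvALoop, pvQuestionTypes, pvMatchedTypes, pvQueryPatterns, pvResponseWords,
    List.filter, List.any]
  generalize (PySem.Str.isIn "what is" ql || (PySem.Str.isIn "what are" ql || (PySem.Str.isIn "what does" ql || false))) = a1
  generalize (PySem.Str.isIn "how to" ql || (PySem.Str.isIn "how do" ql || (PySem.Str.isIn "how can" ql || false))) = a2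
  generalize (PySem.Str.isIn "why is" ql || (PySem.Str.isIn "why do" ql || (PySem.Str.isIn "why does" ql || false))) = a3
  generalize (PySem.Str.isIn "when is" ql || (PySem.Str.isIn "when do" ql || (PySem.Str.isIn "when does" ql || false))) = a4
  generalize (PySem.Str.isIn "where is" ql || (PySem.Str.isIn "where do" ql || (PySem.Str.isIn "where can" ql || false))) = a5
  generalize (PySem.Str.isIn "is" rl || (PySem.Str.isIn "are" rl || (PySem.Str.isIn "refers to" rl || (PySem.Str.isIn "means" rl || false)))) = b1
  generalize (PySem.Str.isIn "you can" rl || (PySem.Str.isIn "steps" rl || (PySem.Str.isIn "process" rl || (PySem.Str.isIn "method" rl || false)))) = b2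
  generalize (PySem.Str.isIn "because" rl || (PySem.Str.isIn "due to" rl || (PySem.Str.isIn "reason" rl || (PySem.Str.isIn "cause" rl || false)))) = b3
  generalize (PySem.Str.isIn "time" rl || (PySem.Str.isIn "date" rl || (PySem.Str.isIn "period" rl || (PySem.Str.isIn "during" rl || false)))) = b4
  generalize (PySem.Str.isIn "location" rl || (PySem.Str.isIn "place" rl || (PySem.Str.isIn "at" rl || (PySem.Str.isIn "in" rl || false)))) = b5
  revert a1 a2 a3 a4 a5 b1 b2 b3 b4 b5
  decide

-- ===== VERDICT (by name: the statement is the Claim_ definition above) =====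
theorem addresses_query_intent_py_spec : Claim_equal_addresses_query_intent_py := by
  intro query response _
  unfold Spec_addresses_query_intent_py addresses_query_intent_py addresses_query_intent_py_alt
  exact pvLoop_eq _ _
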